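-- pv_equiv track=rewrite | github.com/ratiertm/python-hwpx | src/hwpx/oxml/document.py | _distribute_size
-- ===== SOURCE A (Python) =====
-- def _distribute_size(total: int, parts: int) -> list[int]:
--     """Return *parts* integers that sum to *total* and are as even as possible."""
--
--     if parts <= 0:
--         return []
--
--     base = total // parts
--     remainder = total - (base * parts)
--     sizes: list[int] = []
--     for index in range(parts):
--         value = base
--         if remainder > 0:
--             value += 1
--             remainder -= 1
--         sizes.append(max(value, 0))
--     return sizes
-- ===== SOURCE B (Python) =====
-- def _distribute_size(total: int, parts: int) -> list[int]:
--     """Return *parts* integers that sum to *total* and are as even as possible."""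
--     sizes = []
--     while parts > 0:
--         head = -((-total) // parts)  # ceil(total/parts): fair share for the next slot
--         sizes.append(max(head, 0))
--         total -= head
--         parts -= 1
--     return sizes
-- ===== Notes on version B (the rewrite author's own statement) =====
-- stated objective: alternative
-- what changed: Replaces A's precomputed base/remainder counter loop by a greedy peeling loop: each step takes head = ceil(remaining_total/remaining_parts) as the next element and shrinks both the total and the part count, with no divmod or remainder bookkeeping.
import Mathlib
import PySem

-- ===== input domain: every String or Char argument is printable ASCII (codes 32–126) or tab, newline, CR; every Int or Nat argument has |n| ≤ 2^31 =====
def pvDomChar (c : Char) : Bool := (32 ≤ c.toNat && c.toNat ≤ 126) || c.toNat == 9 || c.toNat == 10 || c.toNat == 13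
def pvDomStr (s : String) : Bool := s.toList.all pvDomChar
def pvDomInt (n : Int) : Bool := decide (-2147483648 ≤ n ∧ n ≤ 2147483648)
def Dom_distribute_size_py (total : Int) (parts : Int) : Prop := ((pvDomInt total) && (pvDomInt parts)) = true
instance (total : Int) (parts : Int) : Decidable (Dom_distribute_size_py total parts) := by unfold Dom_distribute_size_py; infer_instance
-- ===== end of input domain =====

-- B replaces A's precomputed base/remainder counter loop by a greedy peeling loop:
-- each step emits ceil(remaining_total/remaining_parts) and shrinks both; objective: alternative.

-- ===== PORT A =====
def distribute_size_py (total : Int) (parts : Int) : List Int :=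
  if parts ≤ 0 then []
  else
    let base := PySem.Int.floordiv total parts
    let remainder := total - base * parts
    -- for index in range(parts): value = base; if remainder > 0: value += 1; remainder -= 1; sizes.append(max(value, 0))
    ((PySem.List.pyRange 0 parts 1).foldl
      (fun (s : Int × List Int) _ =>
        let value := base
        if s.1 > 0 then (s.1 - 1, s.2 ++ [max (value + 1) 0])
        else (s.1, s.2 ++ [max value 0]))
      (remainder, [])).2

-- ===== PORT B =====
-- fuel = number of loop iterations of Source B's 'while parts > 0' loop (parts decreases by 1 each turn)
def pvAltGo : Nat → Int → Int → List Int
  | 0, _, _ => []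
  | n + 1, total, parts =>
      let head := -(PySem.Int.floordiv (-total) parts)  -- head = -((-total) // parts) = ceil(total/parts)
      max head 0 :: pvAltGo n (total - head) (parts - 1)

def distribute_size_py_alt (total : Int) (parts : Int) : List Int :=
  pvAltGo parts.toNat total parts

-- ===== PRECONDITION & SPEC =====
def Spec_distribute_size_py (total : Int) (parts : Int) (out : List Int) : Prop := out = distribute_size_py_alt total parts
instance (total : Int) (parts : Int) (out : List Int) : Decidable (Spec_distribute_size_py total parts out) := by unfold Spec_distribute_size_py; infer_instance

-- ===== CLAIM (what is proved, stated in full; the proofs are below) =====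
def Claim_equal_distribute_size_py : Prop := ∀ (total : Int) (parts : Int), Dom_distribute_size_py total parts → Spec_distribute_size_py total parts (distribute_size_py total parts)

-- ===== LEMMAS AND PROOFS =====

-- uniqueness of the floor-division decomposition for a positive divisor
theorem pv_fd_unique (t p q r : Int) (hp : 0 < p) (ht : t = q * p + r)
    (h0 : 0 ≤ r) (h1 : r < p) :
    PySem.Int.floordiv t p = q ∧ PySem.Int.mod t p = r := by
  have hdm := PySem.Int.floordiv_mul_add_mod t p
  have hm0 := PySem.Int.mod_nonneg t hp
  have hm1 := PySem.Int.mod_lt t hp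
  set Q := PySem.Int.floordiv t p with hQ
  set R := PySem.Int.mod t p with hR
  have hqQ : Q = q := by
    have hmul : (Q - q) * p = r - R := by ring_nf; linarith [hdm, ht]
    rcases lt_trichotomy Q q with h | h | h
    · exfalso
      have : (Q - q) * p ≤ (-1) * p := by
        apply mul_le_mul_of_nonneg_right _ (le_of_lt hp); omega
      omega
    · exact h
    · exfalso
      have : 1 * p ≤ (Q - q) * p := by
        apply mul_le_mul_of_nonneg_right _ (le_of_lt hp); omega
      omega
  refine ⟨hqQ, ?_⟩
  have : Q * p = q * p := by rw [hqQ]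
  omega

-- A's loop with remainder r (0 ≤ r ≤ number of iterations) produces exactly the two blocks.
theorem pv_loop_blocks (base : Int) :
    ∀ (l : List Int) (r : Int) (acc : List Int), 0 ≤ r → r ≤ (l.length : Int) →
      (l.foldl
        (fun (s : Int × List Int) _ =>
          let value := base
          if s.1 > 0 then (s.1 - 1, s.2 ++ [max (value + 1) 0])
          else (s.1, s.2 ++ [max value 0]))
        (r, acc)).2
      = acc ++ List.replicate r.toNat (max (base + 1) 0)
            ++ List.replicate (l.length - r.toNat) (max base 0) := by
  intro l
  induction l with
  | nil => intro r acc h0 h1; simp at h1; simp; omega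
  | cons x xs ih =>
    intro r acc h0 h1
    simp only [List.foldl_cons, List.length_cons]
    by_cases hr : r > 0
    · rw [if_pos hr]
      rw [ih (r - 1) _ (by omega) (by simp at h1 ⊢; omega)]
      have hrt : r.toNat = (r - 1).toNat + 1 := by omega
      rw [hrt, List.replicate_succ]
      simp [List.append_assoc]
    · rw [if_neg hr]
      have hr0 : r = 0 := by omega
      subst hr0
      rw [ih 0 _ (by omega) (by simp)]
      simp [List.replicate_succ, List.append_assoc]

-- B's peeling loop produces the same two blocks.
theorem pv_go_blocks :
    ∀ (n : Nat) (total parts base r : Int), (parts : Int) = (n : Int) + 1 →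
      total = base * parts + r → 0 ≤ r → r < parts →
      pvAltGo (n + 1) total parts
        = List.replicate r.toNat (max (base + 1) 0)
            ++ List.replicate ((parts - r).toNat) (max base 0) := by
  intro n
  induction n with
  | zero =>
    intro total parts base r hp ht h0 h1
    have hr0 : r = 0 := by omega
    have hp1 : parts = 1 := by omega
    subst hr0 hp1
    have hb : base = total := by omega
    simp [pvAltGo, hb]
  | succ m ih =>
    intro total parts base r hp ht h0 h1
    have hp2 : 2 ≤ parts := by omega
    by_cases hr : 0 < r
    · -- head = base + 1
      have hfd : PySem.Int.floordiv (-total) parts = -base - 1 :=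
        (pv_fd_unique (-total) parts (-base - 1) (parts - r) (by omega)
          (by rw [ht]; ring) (by omega) (by omega)).1
      have hhead : -(PySem.Int.floordiv (-total) parts) = base + 1 := by rw [hfd]; ring
      have hstep : pvAltGo (m + 1 + 1) total parts
          = max (base + 1) 0 :: pvAltGo (m + 1) (total - (base + 1)) (parts - 1) := by
        show max (-(PySem.Int.floordiv (-total) parts)) 0
              :: pvAltGo (m + 1) (total - -(PySem.Int.floordiv (-total) parts)) (parts - 1) = _
        rw [hhead]
      rw [hstep, ih (total - (base + 1)) (parts - 1) base (r - 1) (by omega)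
        (by rw [ht]; ring) (by omega) (by omega)]
      have h1' : r.toNat = (r - 1).toNat + 1 := by omega
      have h2' : (parts - 1 - (r - 1)).toNat = (parts - r).toNat := by omega
      rw [h1', h2', List.replicate_succ]
      simp
    · -- r = 0, head = base
      have hr0 : r = 0 := by omega
      subst hr0
      have hfd : PySem.Int.floordiv (-total) parts = -base :=
        (pv_fd_unique (-total) parts (-base) 0 (by omega) (by rw [ht]; ring)
          (by omega) (by omega)).1
      have hstep : pvAltGo (m + 1 + 1) total parts
          = max base 0 :: pvAltGo (m + 1) (total - base) (parts - 1) := by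
        simp [pvAltGo, hfd]
      rw [hstep, ih (total - base) (parts - 1) base 0 (by omega)
        (by rw [ht]; ring) (by omega) (by omega)]
      have h2' : (parts - 0).toNat = (parts - 1 - 0).toNat + 1 := by omega
      rw [h2', List.replicate_succ]
      simp

theorem distribute_size_py_eq (total parts : Int) :
    distribute_size_py total parts = distribute_size_py_alt total parts := by
  unfold distribute_size_py distribute_size_py_alt
  by_cases hp : parts ≤ 0
  · have : parts.toNat = 0 := by omega
    simp [hp, this, pvAltGo]
  · simp only [hp, if_neg, not_false_iff]
    have hppos : 0 < parts := by omega
    have hdm := PySem.Int.floordiv_mul_add_mod total parts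
    set base := PySem.Int.floordiv total parts with hbase
    set r := PySem.Int.mod total parts with hrdef
    have hmod : total - base * parts = r := by omega
    have hnn : 0 ≤ r := PySem.Int.mod_nonneg total hppos
    have hlt : r < parts := PySem.Int.mod_lt total hppos
    have hlen : (PySem.List.pyRange 0 parts 1).length = parts.toNat := by
      have hcast : parts = ((parts.toNat : Nat) : Int) := by omega
      rw [hcast, PySem.List.pyRange_zero_natCast]
      simp
      omega
    rw [hmod, pv_loop_blocks _ _ _ _ hnn (by rw [hlen]; omega), hlen]
    obtain ⟨n, hn⟩ : ∃ n, parts.toNat = n + 1 := ⟨parts.toNat - 1, by omega⟩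
    rw [hn, pv_go_blocks n total parts base r (by omega) (by omega) hnn hlt]
    have h2 : n + 1 - r.toNat = (parts - r).toNat := by omega
    rw [h2]
    simp

-- ===== VERDICT (by name: the statement is the Claim_ definition above) =====
theorem distribute_size_py_spec : Claim_equal_distribute_size_py := by
  intro total parts _
  unfold Spec_distribute_size_py
  exact distribute_size_py_eq total parts
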